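-- pv_equiv track=rewrite | github.com/159Alex951/BTh-06-Twin2AR | Geobasiszwilling/geobasiszwilling_fhnw/export_api/app.py | _decode_highwater_indices
-- ===== SOURCE A (Python) =====
-- def _decode_highwater_indices(encoded_u16):
--     highest = 0
--     out = []
--     for code in encoded_u16:
--         idx = highest - int(code)
--         out.append(idx)
--         if code == 0:
--             highest += 1
--     return out
-- ===== SOURCE B (Python) =====
-- def _decode_highwater_indices(encoded_u16):
--     codes = list(encoded_u16)
--     pre = [0]
--     for c in codes:
--         pre.append(pre[-1] + (1 if c == 0 else 0))
--     return [p - int(c) for p, c in zip(pre, codes)]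
-- ===== Notes on version B (the rewrite author's own statement) =====
-- stated objective: alternative
-- what changed: Replaces the single stateful loop carrying a running highwater counter with two passes: first an exclusive prefix table counting zero codes, then a comprehension subtracting each code from its prefix count.
import Mathlib
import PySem

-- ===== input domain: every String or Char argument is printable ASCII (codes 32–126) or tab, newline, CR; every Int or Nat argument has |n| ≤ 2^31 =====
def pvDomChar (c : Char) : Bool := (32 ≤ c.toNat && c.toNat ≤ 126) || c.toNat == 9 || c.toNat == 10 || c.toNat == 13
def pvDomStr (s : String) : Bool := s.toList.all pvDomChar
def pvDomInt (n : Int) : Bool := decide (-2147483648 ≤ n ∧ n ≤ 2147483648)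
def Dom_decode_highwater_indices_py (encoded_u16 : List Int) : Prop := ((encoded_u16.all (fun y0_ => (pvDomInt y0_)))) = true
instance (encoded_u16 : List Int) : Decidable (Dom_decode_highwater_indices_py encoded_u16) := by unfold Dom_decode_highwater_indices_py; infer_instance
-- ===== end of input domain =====

-- B replaces A's single stateful loop by a precomputed exclusive prefix-count-of-zeros table plus a zip pass (alternative decomposition, same cost).

-- ===== PORT A =====
-- A: one loop carrying (highest, out); append highest - code, bump highest on zero codes.
def decode_highwater_indices_py (encoded_u16 : List Int) : List Int :=
  (encoded_u16.foldl
    (fun (st : Int × List Int) code =>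
      let idx := st.1 - code
      let out := st.2 ++ [idx]
      (if code = 0 then st.1 + 1 else st.1, out))
    (0, [])).2

-- ===== PORT B =====
-- B: build pre = [0] extended by pre[-1] + flag for each code, then map subtraction over zip pre codes.
def decode_highwater_indices_py_alt (encoded_u16 : List Int) : List Int :=
  let pre := encoded_u16.foldl
    (fun acc c => acc ++ [acc.getLast! + (if c = 0 then 1 else 0)]) [(0 : Int)]
  (pre.zip encoded_u16).map (fun pc => pc.1 - pc.2)

-- ===== PRECONDITION & SPEC =====
def Spec_decode_highwater_indices_py (encoded_u16 : List Int) (out : List Int) : Prop := out = decode_highwater_indices_py_alt encoded_u16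
instance (encoded_u16 : List Int) (out : List Int) : Decidable (Spec_decode_highwater_indices_py encoded_u16 out) := by unfold Spec_decode_highwater_indices_py; infer_instance

-- ===== CLAIM (what is proved, stated in full; the proofs are below) =====
def Claim_equal_decode_highwater_indices_py : Prop := ∀ (encoded_u16 : List Int), Dom_decode_highwater_indices_py encoded_u16 → Spec_decode_highwater_indices_py encoded_u16 (decode_highwater_indices_py encoded_u16)

-- ===== LEMMAS AND PROOFS =====

-- reference spec: the decoded list starting from highwater h
def hwSpec : List Int → Int → List Int
  | [], _ => []
  | c :: cs, h => (h - c) :: hwSpec cs (if c = 0 then h + 1 else h)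

-- the prefix values appended after an initial highwater h
def hwPres : List Int → Int → List Int
  | [], _ => []
  | c :: cs, h =>
    let h' := h + (if c = 0 then 1 else 0)
    h' :: hwPres cs h'

lemma foldA_eq (l : List Int) : ∀ (h : Int) (out0 : List Int),
    (l.foldl
      (fun (st : Int × List Int) code =>
        let idx := st.1 - code
        let out := st.2 ++ [idx]
        (if code = 0 then st.1 + 1 else st.1, out))
      (h, out0)).2 = out0 ++ hwSpec l h := by
  induction l with
  | nil => intro h out0; simp [hwSpec]
  | cons c cs ih =>
    intro h out0
    simp only [List.foldl_cons, hwSpec]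
    rw [ih]
    simp

lemma foldB_eq (l : List Int) : ∀ (p : List Int), p ≠ [] →
    l.foldl (fun acc c => acc ++ [acc.getLast! + (if c = 0 then 1 else 0)]) p
      = p ++ hwPres l p.getLast! := by
  induction l with
  | nil => intro p _; simp [hwPres]
  | cons c cs ih =>
    intro p hp
    simp only [List.foldl_cons, hwPres]
    rw [ih (p ++ [p.getLast! + (if c = 0 then 1 else 0)]) (by simp)]
    have : (p ++ [p.getLast! + (if c = 0 then 1 else 0)]).getLast! = p.getLast! + (if c = 0 then 1 else 0) := by
      rcases p with _ | ⟨x, xs⟩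
      · exact absurd rfl hp
      · simp [List.getLast!]
    rw [this]
    simp

lemma zip_pres_eq (l : List Int) : ∀ (h : Int),
    ((h :: hwPres l h).zip l).map (fun pc : Int × Int => pc.1 - pc.2) = hwSpec l h := by
  induction l with
  | nil => intro h; simp [hwSpec]
  | cons c cs ih =>
    intro h
    simp only [hwPres, List.zip_cons_cons, List.map_cons, hwSpec, List.cons.injEq]
    refine ⟨trivial, ?_⟩
    rw [ih]
    congr 1
    by_cases hc : c = 0 <;> simp [hc]

-- ===== VERDICT (by name: the statement is the Claim_ definition above) =====
theorem decode_highwater_indices_py_spec : Claim_equal_decode_highwater_indices_py := by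
  intro l _
  unfold Spec_decode_highwater_indices_py decode_highwater_indices_py decode_highwater_indices_py_alt
  rw [foldA_eq l 0 [], foldB_eq l [(0 : Int)] (by simp)]
  simpa using (zip_pres_eq l 0).symm
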